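-- pv_equiv track=rewrite | github.com/NanChanNN/FlowHON | code/hon_or/utilityMy.py | getHoNNodeIndex
-- ===== SOURCE A (Python) =====
-- def neighborhood(node2index, num, r):
--     for i in range(1,r+1):
--         name = str(num+i) + "|"
--         if name in node2index :
--             return name
--         name = str(num-i) + "|"
--         if name in node2index :
--             return name
--     return "-1|"
--
-- def getNodeIndex(node2index, num):
--     name = str(num) + "|"
--
--     if(name not in node2index):
--         name = neighborhood(node2index, num, 1)
--     return node2index[name]
--
-- def constructName(curr, prev):
--     name = str(curr) + "|"
--     size = len(prev)
--     for i in range(size):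
--         pNode = prev[i]
--         if(i==size-1):
--             name += str(pNode)
--         else:
--             name += (str(pNode) + ".")
--     return name
--
-- def getHoNNodeIndex(node2index, testArr, step, max_order=3):
--     curr = int(testArr[step])
--     prev = []
--     currIndex = getNodeIndex(node2index, curr)
--
--     for i in range(1, max_order):
--         prev.append(int(testArr[step-i]))
--         name = constructName(curr, prev)
--         if name in node2index:
--             currIndex = node2index[name]
--
--     return currIndex
-- ===== SOURCE B (Python) =====
-- def _baseKey(node2index, num):
--     for cand in (str(num) + "|", str(num + 1) + "|", str(num - 1) + "|"):
--         if cand in node2index: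
--             return cand
--     return "-1|"
--
--
-- def getHoNNodeIndex(node2index, testArr, step, max_order=3):
--     curr = int(testArr[step])
--     base = node2index[_baseKey(node2index, curr)]
--     prev = [int(testArr[step - i]) for i in range(1, max_order)]
--     for k in range(max_order - 1, 0, -1):
--         name = str(curr) + "|" + ".".join(map(str, prev[:k]))
--         if name in node2index:
--             return node2index[name]
--     return base
-- ===== Notes on version B (the rewrite author's own statement) =====
-- stated objective: alternative
-- what changed: A appends to the history inside the loop, rebuilds the name from scratch each order and keeps overwriting the index on every match; B precomputes the whole history once, then scans orders longest-first and returns at the first name found (falling back to a base index looked up via a flat candidate-key list instead of A's nested neighborhood loop).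
import Mathlib
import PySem

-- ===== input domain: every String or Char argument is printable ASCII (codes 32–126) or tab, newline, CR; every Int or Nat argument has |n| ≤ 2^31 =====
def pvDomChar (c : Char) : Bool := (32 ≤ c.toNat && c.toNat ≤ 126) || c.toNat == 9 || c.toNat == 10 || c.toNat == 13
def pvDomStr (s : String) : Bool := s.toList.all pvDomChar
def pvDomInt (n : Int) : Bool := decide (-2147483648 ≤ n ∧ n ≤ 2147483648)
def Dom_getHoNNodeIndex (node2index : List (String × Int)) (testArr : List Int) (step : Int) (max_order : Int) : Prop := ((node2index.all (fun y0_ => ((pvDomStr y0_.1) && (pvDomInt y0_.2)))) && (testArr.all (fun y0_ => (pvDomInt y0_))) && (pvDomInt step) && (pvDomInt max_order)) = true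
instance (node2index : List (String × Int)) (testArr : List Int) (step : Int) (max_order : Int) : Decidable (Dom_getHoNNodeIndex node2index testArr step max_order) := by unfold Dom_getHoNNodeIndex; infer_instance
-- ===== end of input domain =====

-- B replaces A's append-and-rescan loop (rebuilding the name from scratch each order and keeping the
-- last match) by a longest-first scan over precomputed history that returns at the first match.

-- ===== PORT A =====
-- helper: Python's neighborhood(node2index, num, r) — loop over range(1, r+1) with early return
def pyNeighLoop (d : PySem.Dict String Int) (num : Int) : List Int → String
  | [] => "-1|"
  | i :: rest =>
    let name := PySem.Int.toStr (num + i) ++ "|"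
    if d.contains name then name
    else
      let name := PySem.Int.toStr (num - i) ++ "|"
      if d.contains name then name
      else pyNeighLoop d num rest

def pyNeighborhood (d : PySem.Dict String Int) (num : Int) (r : Int) : String :=
  pyNeighLoop d num (PySem.List.pyRange 1 (r + 1) 1)

-- helper: Python's getNodeIndex — none = KeyError
def pyGetNodeIndex (d : PySem.Dict String Int) (num : Int) : Option Int :=
  let name := PySem.Int.toStr num ++ "|"
  let name := if ¬ d.contains name then pyNeighborhood d num 1 else name
  d.get? name

-- helper: Python's constructName — loop over range(len(prev)) with the last-index test
def pyConstructName (curr : Int) (prev : List Int) : String :=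
  (PySem.List.enumerate prev).foldl
    (fun name p =>
      if p.1 == (prev.length : Int) - 1 then name ++ PySem.Int.toStr p.2
      else name ++ (PySem.Int.toStr p.2 ++ ".")) (PySem.Int.toStr curr ++ "|")

-- the for-loop of A: state (prev, currIndex); none = IndexError on testArr[step-i]
def pyHonLoop (d : PySem.Dict String Int) (testArr : List Int) (step : Int) (curr : Int) :
    List Int → List Int → Int → Option Int
  | [], _, currIndex => some currIndex
  | i :: rest, prev, currIndex =>
    match PySem.List.pyGet? testArr (step - i) with
    | none => none
    | some p =>
      let prev' := prev ++ [p]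
      let name := pyConstructName curr prev'
      pyHonLoop d testArr step curr rest prev' (if d.contains name then d.getD name 0 else currIndex)

-- none = the Python raises (IndexError/KeyError); excluded by Pre_
def pyHonCoreA (node2index : List (String × Int)) (testArr : List Int) (step : Int) (max_order : Int) : Option Int :=
  let d := PySem.Dict.ofList node2index
  match PySem.List.pyGet? testArr step with
  | none => none
  | some curr =>
    match pyGetNodeIndex d curr with
    | none => none
    | some currIndex => pyHonLoop d testArr step curr (PySem.List.pyRange 1 max_order 1) [] currIndex

def getHoNNodeIndex (node2index : List (String × Int)) (testArr : List Int) (step : Int) (max_order : Int) : Int :=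
  (pyHonCoreA node2index testArr step max_order).getD 0

-- ===== PORT B =====
-- helper: _baseKey — first present candidate among num|, num+1|, num-1|, else "-1|"
def bScanKeys (d : PySem.Dict String Int) : List String → String
  | [] => "-1|"
  | c :: rest => if d.contains c then c else bScanKeys d rest

def bBaseKey (d : PySem.Dict String Int) (num : Int) : String :=
  bScanKeys d [PySem.Int.toStr num ++ "|", PySem.Int.toStr (num + 1) ++ "|", PySem.Int.toStr (num - 1) ++ "|"]

-- the comprehension [int(testArr[step-i]) for i in range(1, max_order)]; none = IndexError
def bCollectPrev (testArr : List Int) (step : Int) : List Int → Option (List Int)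
  | [] => some []
  | i :: rest =>
    match PySem.List.pyGet? testArr (step - i) with
    | none => none
    | some p => (bCollectPrev testArr step rest).map (p :: ·)

-- the longest-first scan: first k (descending) whose name is present wins, else base
def bScanOrders (d : PySem.Dict String Int) (curr : Int) (prev : List Int) :
    List Int → Int → Int
  | [], base => base
  | k :: rest, base =>
    let name := PySem.Int.toStr curr ++ "|" ++
      PySem.Str.join "." ((PySem.List.slice prev none (some k)).map PySem.Int.toStr)
    match d.get? name with
    | some v => v
    | none => bScanOrders d curr prev rest base

def pyHonCoreB (node2index : List (String × Int)) (testArr : List Int) (step : Int) (max_order : Int) : Option Int :=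
  let d := PySem.Dict.ofList node2index
  match PySem.List.pyGet? testArr step with
  | none => none
  | some curr =>
    match d.get? (bBaseKey d curr) with
    | none => none
    | some base =>
      match bCollectPrev testArr step (PySem.List.pyRange 1 max_order 1) with
      | none => none
      | some prev => some (bScanOrders d curr prev (PySem.List.pyRange (max_order - 1) 0 (-1)) base)

def getHoNNodeIndex_alt (node2index : List (String × Int)) (testArr : List Int) (step : Int) (max_order : Int) : Int :=
  (pyHonCoreB node2index testArr step max_order).getD 0

-- ===== PRECONDITION & SPEC =====
-- Pre_ excludes exactly the inputs where the Python raises: testArr[step] or some testArr[step-i]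
-- out of range (IndexError), or none of the four base-key candidates is a key (KeyError).
def Pre_getHoNNodeIndex (node2index : List (String × Int)) (testArr : List Int) (step : Int) (max_order : Int) : Prop :=
  PySem.Raise.InRange testArr.length step ∧
  (∀ i ∈ PySem.List.pyRange 1 max_order 1, PySem.Raise.InRange testArr.length (step - i)) ∧
  (let curr := PySem.List.pyGetD testArr step 0
   let d := PySem.Dict.ofList node2index
   d.contains (PySem.Int.toStr curr ++ "|") = true ∨
   d.contains (PySem.Int.toStr (curr + 1) ++ "|") = true ∨
   d.contains (PySem.Int.toStr (curr - 1) ++ "|") = true ∨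
   d.contains "-1|" = true)

instance (node2index : List (String × Int)) (testArr : List Int) (step : Int) (max_order : Int) : Decidable (Pre_getHoNNodeIndex node2index testArr step max_order) := by unfold Pre_getHoNNodeIndex; infer_instance

def pvWitness_getHoNNodeIndex : (List (String × Int)) × List Int × Int × Int := ([("1|", 0)], [1, 1], 1, 3)

def Spec_getHoNNodeIndex (node2index : List (String × Int)) (testArr : List Int) (step : Int) (max_order : Int) (out : Int) : Prop := out = getHoNNodeIndex_alt node2index testArr step max_order
instance (node2index : List (String × Int)) (testArr : List Int) (step : Int) (max_order : Int) (out : Int) : Decidable (Spec_getHoNNodeIndex node2index testArr step max_order out) := by unfold Spec_getHoNNodeIndex; infer_instance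

-- ===== CLAIM (what is proved, stated in full; the proofs are below) =====
def Claim_equal_getHoNNodeIndex : Prop := ∀ (node2index : List (String × Int)) (testArr : List Int) (step : Int) (max_order : Int), Dom_getHoNNodeIndex node2index testArr step max_order → Pre_getHoNNodeIndex node2index testArr step max_order → Spec_getHoNNodeIndex node2index testArr step max_order (getHoNNodeIndex node2index testArr step max_order)

-- ===== LEMMAS AND PROOFS =====

theorem base_eq (d : PySem.Dict String Int) (curr : Int) :
    pyGetNodeIndex d curr = d.get? (bBaseKey d curr) := by
  have h : PySem.List.pyRange 1 2 1 = [1] := by decide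
  simp [pyGetNodeIndex, pyNeighborhood, h, pyNeighLoop, bBaseKey, bScanKeys]
  split_ifs <;> simp_all
def revScan (d : PySem.Dict String Int) (curr : Int) : List Int → List Int → Option Int
  | _, [] => none
  | prevAcc, p :: ps =>
    match revScan d curr (prevAcc ++ [p]) ps with
    | some v => some v
    | none => d.get? (pyConstructName curr (prevAcc ++ [p]))

def bFirst (d : PySem.Dict String Int) (curr : Int) (prev : List Int) : List Int → Option Int
  | [] => none
  | k :: rest =>
    match d.get? (PySem.Int.toStr curr ++ "|" ++
        PySem.Str.join "." ((PySem.List.slice prev none (some k)).map PySem.Int.toStr)) with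
    | some v => some v
    | none => bFirst d curr prev rest

theorem honLoop_none (d : PySem.Dict String Int) (testArr : List Int) (step curr : Int) :
    ∀ ks prevAcc idx, bCollectPrev testArr step ks = none →
      pyHonLoop d testArr step curr ks prevAcc idx = none := by
  intro ks
  induction ks with
  | nil => intro _ _ h; simp [bCollectPrev] at h
  | cons i rest ih =>
    intro prevAcc idx h
    simp only [bCollectPrev, pyHonLoop] at *
    cases hg : PySem.List.pyGet? testArr (step - i) with
    | none => simp
    | some p =>
      simp [hg] at h ⊢
      cases hr : bCollectPrev testArr step rest with
      | none => exact ih _ _ hr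
      | some ps => simp [hr] at h

theorem getD_if (d : PySem.Dict String Int) (n : String) (idx : Int) :
    (if d.contains n then d.getD n 0 else idx) = (d.get? n).getD idx := by
  rw [PySem.Dict.contains_eq_isSome_get?]
  cases h : d.get? n with
  | none => simp
  | some v => simp [PySem.Dict.getD_eq_get?_getD, h]

theorem honLoop_some (d : PySem.Dict String Int) (testArr : List Int) (step curr : Int) :
    ∀ ks ps prevAcc idx, bCollectPrev testArr step ks = some ps →
      pyHonLoop d testArr step curr ks prevAcc idx = some ((revScan d curr prevAcc ps).getD idx) := by
  intro ks
  induction ks with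
  | nil => intro ps _ idx h; simp [bCollectPrev] at h; subst h; simp [pyHonLoop, revScan]
  | cons i rest ih =>
    intro ps prevAcc idx h
    simp only [bCollectPrev] at h
    cases hg : PySem.List.pyGet? testArr (step - i) with
    | none => simp [hg] at h
    | some p =>
      simp [hg] at h
      cases hr : bCollectPrev testArr step rest with
      | none => simp [hr] at h
      | some ps' =>
        simp [hr] at h
        subst h
        simp only [pyHonLoop, hg]
        rw [ih _ _ _ hr, getD_if]
        simp only [revScan]
        cases hs : revScan d curr (prevAcc ++ [p]) ps' with
        | none => simp
        | some v => simp

theorem bScanOrders_eq (d : PySem.Dict String Int) (curr : Int) (prev : List Int) :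
    ∀ ks base, bScanOrders d curr prev ks base = (bFirst d curr prev ks).getD base := by
  intro ks
  induction ks with
  | nil => intro base; simp [bScanOrders, bFirst]
  | cons k rest ih =>
    intro base
    simp only [bScanOrders, bFirst]
    cases h : d.get? (PySem.Int.toStr curr ++ "|" ++
        PySem.Str.join "." ((PySem.List.slice prev none (some k)).map PySem.Int.toStr)) with
    | none => simp [ih]
    | some v => simp

theorem collectPrev_length (testArr : List Int) (step : Int) :
    ∀ ks ps, bCollectPrev testArr step ks = some ps → ps.length = ks.length := by
  intro ks
  induction ks with
  | nil => intro ps h; simp [bCollectPrev] at h; simp [← h]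
  | cons i rest ih =>
    intro ps h
    simp only [bCollectPrev] at h
    cases hg : PySem.List.pyGet? testArr (step - i) with
    | none => simp [hg] at h
    | some p =>
      simp [hg] at h
      cases hr : bCollectPrev testArr step rest with
      | none => simp [hr] at h
      | some ps' => simp [hr] at h; simp [← h, ih _ hr]
def dottedStr : List Int → String
  | [] => ""
  | p :: ps => PySem.Int.toStr p ++ "." ++ dottedStr ps

theorem chars_join_snoc (sep c : List Char) :
    ∀ ls, PySem.Chars.join sep (ls ++ [c]) = ls.flatMap (fun p => p ++ sep) ++ c := by
  intro ls
  induction ls with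
  | nil => simp [PySem.Chars.join_singleton]
  | cons p ls' ih =>
    cases ls' with
    | nil => simp [PySem.Chars.join_cons_cons, PySem.Chars.join_singleton]
    | cons q ls'' =>
      simp only [List.cons_append, PySem.Chars.join_cons_cons] at *
      simp [ih]

theorem dottedStr_toList (l : List Int) :
    (dottedStr l).toList = (l.map (fun p => (PySem.Int.toStr p).toList)).flatMap (fun p => p ++ ['.']) := by
  induction l with
  | nil => simp [dottedStr]
  | cons p ps ih => simp [dottedStr, ih]

theorem join_snoc (xs : List Int) (x : Int) :
    PySem.Str.join "." ((xs ++ [x]).map PySem.Int.toStr) = dottedStr xs ++ PySem.Int.toStr x := by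
  apply String.ext
  simp [PySem.Str.toList_join, chars_join_snoc, dottedStr_toList, List.flatMap_map]

theorem fold_dots (n : Int) : ∀ (xs : List Int) (s : Int) (acc : String), s + xs.length ≤ n →
    (PySem.List.enumerate xs s).foldl
      (fun name p => if p.1 == n then name ++ PySem.Int.toStr p.2
        else name ++ (PySem.Int.toStr p.2 ++ ".")) acc = acc ++ dottedStr xs := by
  intro xs
  induction xs with
  | nil => intro s acc _; simp [PySem.List.enumerate_nil, dottedStr]
  | cons x xs ih =>
    intro s acc h
    simp only [PySem.List.enumerate_cons, List.foldl_cons, List.length_cons] at *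
    have hne : (s == n) = false := by simp; omega
    rw [hne]
    simp only [Bool.false_eq_true, if_false]
    rw [ih (s+1) _ (by push_cast at h ⊢; omega)]
    simp [dottedStr]
    apply String.ext
    simp

theorem constructName_eq (curr : Int) (prev : List Int) :
    pyConstructName curr prev =
      PySem.Int.toStr curr ++ "|" ++ PySem.Str.join "." (prev.map PySem.Int.toStr) := by
  induction prev using List.reverseRecOn with
  | nil =>
    simp [pyConstructName, PySem.List.enumerate_nil]
    apply String.ext
    simp [PySem.Str.toList_join, PySem.Chars.join]
    decide
  | append_singleton xs x _ =>
    unfold pyConstructName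
    rw [PySem.List.enumerate_append, List.foldl_append]
    rw [fold_dots ((((xs ++ [x]).length : Int)) - 1) xs 0 _ (by simp)]
    simp only [PySem.List.enumerate_cons, PySem.List.enumerate_nil, List.foldl_cons, List.foldl_nil]
    have ht : ((0 + (xs.length:Int)) == ((xs ++ [x]).length : Int) - 1) = true := by simp
    rw [ht]
    simp only [if_true]
    rw [join_snoc]
    apply String.ext
    simp
theorem pyRange_neg_snoc (a b : Int) (h : b < a) :
    PySem.List.pyRange a b (-1) = PySem.List.pyRange a (b + 1) (-1) ++ [b + 1] := by
  rw [PySem.List.pyRange_neg_one_eq_reverse, PySem.List.pyRange_one_cons (by omega : b + 1 < a + 1)]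
  rw [List.reverse_cons, PySem.List.pyRange_neg_one_eq_reverse a (b + 1)]

theorem bFirst_append (d : PySem.Dict String Int) (curr : Int) (prev : List Int) (ys : List Int) :
    ∀ xs, bFirst d curr prev (xs ++ ys) =
      match bFirst d curr prev xs with
      | some v => some v
      | none => bFirst d curr prev ys := by
  intro xs
  induction xs with
  | nil => simp [bFirst]
  | cons k rest ih =>
    simp only [List.cons_append, bFirst]
    cases d.get? (PySem.Int.toStr curr ++ "|" ++
        PySem.Str.join "." ((PySem.List.slice prev none (some k)).map PySem.Int.toStr)) with
    | none => simp [ih]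
    | some v => simp

theorem bFirst_eq_revScan (d : PySem.Dict String Int) (curr : Int) :
    ∀ ps prevAcc, bFirst d curr (prevAcc ++ ps)
        (PySem.List.pyRange ((prevAcc.length : Int) + ps.length) prevAcc.length (-1)) =
      revScan d curr prevAcc ps := by
  intro ps
  induction ps with
  | nil =>
    intro prevAcc
    rw [show ((prevAcc.length : Int) + ([] : List Int).length) = (prevAcc.length : Int) by simp]
    rw [PySem.List.pyRange_neg_one_eq_nil le_rfl]
    simp [bFirst, revScan]
  | cons p ps' ih =>
    intro prevAcc
    rw [pyRange_neg_snoc _ _ (by push_cast [List.length_cons]; omega)]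
    rw [bFirst_append]
    have harg : ((prevAcc.length : Int) + ((p :: ps').length : Int)) = (((prevAcc ++ [p]).length : Int) + (ps'.length : Int)) := by
      simp; omega
    have hlist : prevAcc ++ p :: ps' = (prevAcc ++ [p]) ++ ps' := by simp
    have hlen1 : (prevAcc.length : Int) + 1 = ((prevAcc ++ [p]).length : Int) := by simp
    rw [harg, hlist, hlen1, ih (prevAcc ++ [p])]
    have hslice : PySem.List.slice ((prevAcc ++ [p]) ++ ps') none (some ((prevAcc ++ [p]).length : Int)) = prevAcc ++ [p] := by
      rw [PySem.List.slice_to _ (by positivity), Int.toNat_natCast]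
      exact List.take_left' rfl
    simp only [revScan, bFirst, hslice, ← constructName_eq]
    cases revScan d curr (prevAcc ++ [p]) ps' with
    | none =>
      simp only []
      cases d.get? (pyConstructName curr (prevAcc ++ [p])) <;> rfl
    | some v => rfl

theorem core_eq (node2index : List (String × Int)) (testArr : List Int) (step max_order : Int) :
    pyHonCoreA node2index testArr step max_order = pyHonCoreB node2index testArr step max_order := by
  unfold pyHonCoreA pyHonCoreB
  cases hg : PySem.List.pyGet? testArr step with
  | none => simp
  | some curr =>
    simp only []
    rw [base_eq]
    cases hb : (PySem.Dict.ofList node2index).get? (bBaseKey (PySem.Dict.ofList node2index) curr) with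
    | none => rfl
    | some base =>
      cases hc : bCollectPrev testArr step (PySem.List.pyRange 1 max_order 1) with
      | none => simp [honLoop_none _ _ _ _ _ _ _ hc]
      | some ps =>
        simp only []
        rw [honLoop_some _ _ _ _ _ _ _ _ hc, bScanOrders_eq]
        have hlen : ps.length = (max_order - 1).toNat := by
          rw [collectPrev_length _ _ _ _ hc, PySem.List.length_pyRange_one]
        have hr : PySem.List.pyRange (max_order - 1) 0 (-1) = PySem.List.pyRange ((ps.length : Int)) 0 (-1) := by
          by_cases h1 : 1 ≤ max_order
          · congr 1; rw [hlen]; omega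
          · rw [PySem.List.pyRange_neg_one_eq_nil (by omega), PySem.List.pyRange_neg_one_eq_nil (by rw [hlen]; omega)]
        rw [hr]
        have := bFirst_eq_revScan (PySem.Dict.ofList node2index) curr ps []
        simp only [List.nil_append, List.length_nil, Int.ofNat_zero, zero_add] at this
        rw [← this]

-- ===== VERDICT (by name: the statement is the Claim_ definition above) =====
theorem getHoNNodeIndex_spec : Claim_equal_getHoNNodeIndex := by
  intro node2index testArr step max_order _ _
  unfold Spec_getHoNNodeIndex getHoNNodeIndex getHoNNodeIndex_alt
  rw [core_eq]
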